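-- pv_equiv track=rewrite | github.com/Noeinkan/W4_AgenticSupplyChain | src/orchestrator/ingestion/climate.py | _score_weather_severity
-- ===== SOURCE A (Python) =====
-- def _score_weather_severity(alert: dict) -> int:
--     """Map weather alert to 1–5 severity scale for supply chain impact."""
--     text = (alert.get("event", "") + " " + alert.get("description", "")).lower()
--     if any(k in text for k in ["hurricane", "typhoon", "cyclone", "major flood", "catastrophic"]):
--         return 5
--     if any(k in text for k in ["tropical storm", "blizzard", "severe flood", "wildfire"]):
--         return 4
--     if any(k in text for k in ["storm", "tornado", "freeze", "heat wave", "drought"]):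
--         return 3
--     if any(k in text for k in ["rain", "wind", "fog", "ice"]):
--         return 2
--     return 1
-- ===== SOURCE B (Python) =====
-- _SEVERITY = {
--     "hurricane": 5, "typhoon": 5, "cyclone": 5, "major flood": 5, "catastrophic": 5,
--     "tropical storm": 4, "blizzard": 4, "severe flood": 4, "wildfire": 4,
--     "storm": 3, "tornado": 3, "freeze": 3, "heat wave": 3, "drought": 3,
--     "rain": 2, "wind": 2, "fog": 2, "ice": 2,
-- }
--
--
-- def _score_weather_severity(alert: dict) -> int:
--     """Map weather alert to 1-5 severity scale for supply chain impact."""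
--     text = (alert.get("event", "") + " " + alert.get("description", "")).lower()
--     return max((score for kw, score in _SEVERITY.items() if kw in text), default=1)
-- ===== Notes on version B (the rewrite author's own statement) =====
-- stated objective: simpler
-- what changed: Replaces the four-branch ordered short-circuit cascade with a flat keyword->score table and a single aggregate max over the matched scores (default 1), which equals the first cascade hit because tiers are disjoint score levels.
import Mathlib
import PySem

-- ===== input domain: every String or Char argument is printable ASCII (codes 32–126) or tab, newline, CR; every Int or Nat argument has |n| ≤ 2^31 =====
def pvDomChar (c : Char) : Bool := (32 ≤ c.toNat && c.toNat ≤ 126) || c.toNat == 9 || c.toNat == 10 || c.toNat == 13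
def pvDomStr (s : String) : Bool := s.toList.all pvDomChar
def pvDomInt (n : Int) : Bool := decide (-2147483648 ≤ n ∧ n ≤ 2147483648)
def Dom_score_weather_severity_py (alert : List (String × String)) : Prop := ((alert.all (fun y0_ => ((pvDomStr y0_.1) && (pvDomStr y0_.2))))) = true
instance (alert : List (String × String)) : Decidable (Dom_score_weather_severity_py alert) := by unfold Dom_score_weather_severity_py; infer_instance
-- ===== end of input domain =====

-- B replaces A's ordered four-branch keyword cascade with a flat keyword->score table
-- aggregated by a single max (default 1); objective: simpler.


-- ===== PORT A =====
-- (alert.get("event","") + " " + alert.get("description","")).lower(), as code points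
-- (string concatenation is list append on code points; exact on the stated domain)
def pvAlertText (alert : List (String × String)) : List Char :=
  PySem.Chars.lower
    ((PySem.Dict.getD (PySem.Dict.mk alert) "event" "").toList ++
      ' ' :: (PySem.Dict.getD (PySem.Dict.mk alert) "description" "").toList)

def score_weather_severity_py (alert : List (String × String)) : Int :=
  let text := pvAlertText alert
  if (["hurricane", "typhoon", "cyclone", "major flood", "catastrophic"].any
      (fun k => PySem.Chars.isIn k.toList text)) then 5
  else if (["tropical storm", "blizzard", "severe flood", "wildfire"].any
      (fun k => PySem.Chars.isIn k.toList text)) then 4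
  else if (["storm", "tornado", "freeze", "heat wave", "drought"].any
      (fun k => PySem.Chars.isIn k.toList text)) then 3
  else if (["rain", "wind", "fog", "ice"].any
      (fun k => PySem.Chars.isIn k.toList text)) then 2
  else 1

-- ===== PORT B =====
def pvSevTable : List (String × Int) :=
  [("hurricane", 5), ("typhoon", 5), ("cyclone", 5), ("major flood", 5), ("catastrophic", 5),
   ("tropical storm", 4), ("blizzard", 4), ("severe flood", 4), ("wildfire", 4),
   ("storm", 3), ("tornado", 3), ("freeze", 3), ("heat wave", 3), ("drought", 3),
   ("rain", 2), ("wind", 2), ("fog", 2), ("ice", 2)]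

def score_weather_severity_py_alt (alert : List (String × String)) : Int :=
  let text := pvAlertText alert
  let scores := pvSevTable.filterMap
    (fun p => if PySem.Chars.isIn p.1.toList text then some p.2 else none)
  (PySem.List.max? scores id).getD 1

-- ===== PRECONDITION & SPEC =====
def Spec_score_weather_severity_py (alert : List (String × String)) (out : Int) : Prop := out = score_weather_severity_py_alt alert
instance (alert : List (String × String)) (out : Int) : Decidable (Spec_score_weather_severity_py alert out) := by unfold Spec_score_weather_severity_py; infer_instance

-- ===== CLAIM (what is proved, stated in full; the proofs are below) =====
def Claim_equal_score_weather_severity_py : Prop := ∀ (alert : List (String × String)), Dom_score_weather_severity_py alert → Spec_score_weather_severity_py alert (score_weather_severity_py alert)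

-- ===== LEMMAS AND PROOFS =====

-- the filterMap over one tier (constant score s) is the matched keywords mapped to s
theorem pv_tier_filterMap (kws : List String) (s : Int) (text : List Char) :
    (kws.map (fun k => (k, s))).filterMap
      (fun p => if PySem.Chars.isIn p.1.toList text then some p.2 else none)
      = (kws.filter (fun k => PySem.Chars.isIn k.toList text)).map (fun _ => s) := by
  induction kws with
  | nil => rfl
  | cons k t ih =>
    simp only [List.map_cons, List.filterMap_cons, List.filter_cons]
    by_cases h : PySem.Chars.isIn k.toList text = true <;> simp [h, ih]

theorem pv_matched_ne_nil (kws : List String) (s : Int) (text : List Char) :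
    (((kws.filter (fun k => PySem.Chars.isIn k.toList text)).map (fun _ => s)) ≠ [])
      ↔ (kws.any (fun k => PySem.Chars.isIn k.toList text) = true) := by
  simp [List.map_eq_nil_iff, List.filter_eq_nil_iff, List.any_eq_true]

-- proof-side name for max?'s folding step (definitionally equal to it)
def pvStep (acc : Option Int) (x : Int) : Option Int :=
  match acc with
  | none => some x
  | some m => if m < x then some x else some m

theorem pv_max?_eq (l : List Int) : PySem.List.max? l id = l.foldl pvStep none := by
  unfold PySem.List.max?
  congr 1
  funext acc x
  cases acc <;> simp [pvStep]

-- max? keeps its accumulator when nothing in the tail exceeds it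
theorem pv_foldl_max_keep (m : Int) (l : List Int) (h : ∀ y ∈ l, y ≤ m) :
    l.foldl pvStep (some m) = some m := by
  induction l with
  | nil => rfl
  | cons y t ih =>
    have hy : y ≤ m := h y (by simp)
    simp only [List.foldl_cons, pvStep, if_neg (not_lt.mpr hy)]
    exact ih (fun z hz => h z (by simp [hz]))

theorem pv_max_head (x : Int) (l : List Int) (h : ∀ y ∈ l, y ≤ x) :
    (PySem.List.max? (x :: l) id).getD 1 = x := by
  rw [pv_max?_eq]
  simp only [List.foldl_cons, pvStep]
  rw [pv_foldl_max_keep x l h]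
  rfl

-- max over the concatenated tier matches equals the first nonempty tier's score
theorem pv_max_tiers (m5 m4 m3 m2 : List Int)
    (h5 : ∀ x ∈ m5, x = 5) (h4 : ∀ x ∈ m4, x = 4)
    (h3 : ∀ x ∈ m3, x = 3) (h2 : ∀ x ∈ m2, x = 2) :
    (PySem.List.max? (m5 ++ m4 ++ m3 ++ m2) id).getD 1
      = (if m5 ≠ [] then (5 : Int) else if m4 ≠ [] then 4 else if m3 ≠ [] then 3
         else if m2 ≠ [] then 2 else 1) := by
  cases m5 with
  | cons x t =>
    have hx : x = 5 := h5 x (by simp)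
    subst hx
    rw [if_pos (by simp), List.cons_append, List.cons_append, List.cons_append]
    apply pv_max_head
    intro y hy
    simp only [List.mem_append] at hy
    rcases hy with ((hy | hy) | hy) | hy
    · exact le_of_eq (h5 y (by simp [hy]))
    · have := h4 y hy; omega
    · have := h3 y hy; omega
    · have := h2 y hy; omega
  | nil =>
    rw [if_neg (by simp), List.nil_append]
    cases m4 with
    | cons x t =>
      have hx : x = 4 := h4 x (by simp)
      subst hx
      rw [if_pos (by simp), List.cons_append, List.cons_append]
      apply pv_max_head
      intro y hy
      simp only [List.mem_append] at hy
      rcases hy with (hy | hy) | hy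
      · exact le_of_eq (h4 y (by simp [hy]))
      · have := h3 y hy; omega
      · have := h2 y hy; omega
    | nil =>
      rw [if_neg (by simp), List.nil_append]
      cases m3 with
      | cons x t =>
        have hx : x = 3 := h3 x (by simp)
        subst hx
        rw [if_pos (by simp), List.cons_append]
        apply pv_max_head
        intro y hy
        simp only [List.mem_append] at hy
        rcases hy with hy | hy
        · exact le_of_eq (h3 y (by simp [hy]))
        · have := h2 y hy; omega
      | nil =>
        rw [if_neg (by simp), List.nil_append]
        cases m2 with
        | cons x t =>
          have hx : x = 2 := h2 x (by simp)
          subst hx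
          rw [if_pos (by simp)]
          apply pv_max_head
          intro y hy
          exact le_of_eq (h2 y (by simp [hy]))
        | nil => rfl

-- the core equivalence, over an arbitrary text
set_option maxHeartbeats 1000000 in
theorem pv_core (text : List Char) :
    (PySem.List.max? (pvSevTable.filterMap
        (fun p => if PySem.Chars.isIn p.1.toList text then some p.2 else none)) id).getD 1
      = (if (["hurricane", "typhoon", "cyclone", "major flood", "catastrophic"].any
            (fun k => PySem.Chars.isIn k.toList text)) then (5 : Int)
         else if (["tropical storm", "blizzard", "severe flood", "wildfire"].any
            (fun k => PySem.Chars.isIn k.toList text)) then 4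
         else if (["storm", "tornado", "freeze", "heat wave", "drought"].any
            (fun k => PySem.Chars.isIn k.toList text)) then 3
         else if (["rain", "wind", "fog", "ice"].any
            (fun k => PySem.Chars.isIn k.toList text)) then 2
         else 1) := by
  have htab : pvSevTable
      = (["hurricane", "typhoon", "cyclone", "major flood", "catastrophic"].map (fun k => (k, (5 : Int))))
        ++ (["tropical storm", "blizzard", "severe flood", "wildfire"].map (fun k => (k, (4 : Int))))
        ++ (["storm", "tornado", "freeze", "heat wave", "drought"].map (fun k => (k, (3 : Int))))
        ++ (["rain", "wind", "fog", "ice"].map (fun k => (k, (2 : Int)))) := by rfl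
  rw [htab, List.filterMap_append, List.filterMap_append, List.filterMap_append,
      pv_tier_filterMap, pv_tier_filterMap, pv_tier_filterMap, pv_tier_filterMap,
      pv_max_tiers]
  · rw [if_congr (pv_matched_ne_nil _ 5 text) rfl
        (if_congr (pv_matched_ne_nil _ 4 text) rfl
          (if_congr (pv_matched_ne_nil _ 3 text) rfl
            (if_congr (pv_matched_ne_nil _ 2 text) rfl rfl)))]
  all_goals intro x hx; simp only [List.mem_map] at hx; obtain ⟨k, _, hk⟩ := hx; omega

-- ===== VERDICT (by name: the statement is the Claim_ definition above) =====
theorem score_weather_severity_py_spec : Claim_equal_score_weather_severity_py := by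
  intro alert _
  unfold Spec_score_weather_severity_py score_weather_severity_py score_weather_severity_py_alt
  exact (pv_core (pvAlertText alert)).symm
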